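-- pv_equiv track=rewrite | github.com/AussieSeaweed/index-librorum-prohibitorum | dmoj/gfssoc16s2/main.py | ace
-- ===== SOURCE A (Python) =====
-- def ace(n):
--     lookup = [10, 12, 14]
--     base = 1
--     i = 0
--
--     while n >= 0:
--         i += lookup[n % 3] * base
--         n = n // 3 - 1
--         base *= 16
--
--     return i
-- ===== SOURCE B (Python) =====
-- def ace(n):
--     # MSB-first reconstruction: n+1 written in bijective base-3 (digits 1..3);
--     # each digit t becomes the hex digit 8+2*t (a/c/e), assembled most-significant first.
--     v = n + 1
--     if v <= 0:
--         return 0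
--     m = 1
--     while (3 ** (m + 1) - 1) // 2 <= v:
--         m += 1
--     res = 0
--     for j in range(m - 1, -1, -1):
--         p = 3 ** j
--         t = (v - (p - 1) // 2) // p
--         res = res * 16 + 8 + 2 * t
--         v -= t * p
--     return res
-- ===== Notes on version B (the rewrite author's own statement) =====
-- stated objective: alternative
-- what changed: B first computes the number of digits m of n+1 in bijective base-3 via a threshold search on powers of 3, then extracts the digits most-significant-first by arithmetic thresholds ((v-(3^j-1)//2)//3^j) and folds them into the result top-down, instead of A's least-significant-first mod/div loop with a running place-value accumulator.
import Mathlib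
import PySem

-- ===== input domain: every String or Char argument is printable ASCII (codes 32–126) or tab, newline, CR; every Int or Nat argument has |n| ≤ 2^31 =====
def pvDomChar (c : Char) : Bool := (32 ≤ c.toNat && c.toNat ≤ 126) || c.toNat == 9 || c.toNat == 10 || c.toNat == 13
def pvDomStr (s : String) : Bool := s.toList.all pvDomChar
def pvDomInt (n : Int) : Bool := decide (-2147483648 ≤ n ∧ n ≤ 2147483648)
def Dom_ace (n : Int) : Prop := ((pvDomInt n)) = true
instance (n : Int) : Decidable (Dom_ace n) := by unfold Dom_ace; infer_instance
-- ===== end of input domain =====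

-- B reads n+1 in bijective base-3 MOST-significant digit first (digit count found by a
-- threshold search, digits extracted by arithmetic thresholds) and folds the hex digits
-- top-down, instead of A's least-significant-first mod/div accumulator loop (alternative).

-- ===== PORT A =====
-- termination helper: after one loop step n strictly decreases (in the (n+1).toNat measure)
theorem aceStep_lt (n : Int) (h : 0 ≤ n) :
    (PySem.Int.floordiv n 3 - 1 + 1).toNat < (n + 1).toNat := by
  rw [PySem.Int.floordiv_eq_ediv_of_pos (by omega : (0:Int) < 3)]
  omega

-- the while loop of A, state (n, base, i); lookup[n % 3] never raises (0 ≤ n % 3 < 3), getD 0 is unreached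
def aceLoop (n base i : Int) : Int :=
  if h : 0 ≤ n then
    aceLoop (PySem.Int.floordiv n 3 - 1) (base * 16)
      (i + ((PySem.List.pyGet? [10, 12, 14] (PySem.Int.mod n 3)).getD 0) * base)
  else i
termination_by (n + 1).toNat
decreasing_by exact aceStep_lt n h

def ace (n : Int) : Int := aceLoop n 1 0

-- ===== PORT B =====
-- termination helper for the digit-count search: while the threshold (3^(m+1)-1)//2 is ≤ v,
-- m stays below v, so v - m decreases as m increments
theorem pow3_ge (m : Nat) : 2 * (m : Int) + 3 ≤ 3 ^ (m + 1) := by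
  induction m with
  | zero => norm_num
  | succ m ih =>
    have : (3:Int) ^ (m + 1 + 1) = 3 * 3 ^ (m + 1) := by ring
    rw [this]
    push_cast
    omega

theorem floordiv_two_odd (x q : Int) (h : x = 2 * q) :
    PySem.Int.floordiv x 2 = q := by
  rw [PySem.Int.floordiv_eq_ediv_of_pos (by omega : (0:Int) < 2)]
  omega

theorem pow3_sub_one_even (k : Nat) : ∃ q, (3:Int) ^ k - 1 = 2 * q := by
  induction k with
  | zero => exact ⟨0, by norm_num⟩
  | succ m ih =>
    obtain ⟨q, hq⟩ := ih
    exact ⟨3 * q + 1, by rw [pow_succ]; nlinarith⟩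

theorem findM_step (v : Int) (m : Nat)
    (h : PySem.Int.floordiv ((3:Int) ^ (m + 1) - 1) 2 ≤ v) :
    (v + 1 - (↑(m + 1) : Int)).toNat < (v + 1 - (↑m : Int)).toNat := by
  obtain ⟨q, hq⟩ := pow3_sub_one_even (m + 1)
  rw [hq, floordiv_two_odd _ q rfl] at h
  have h3 := pow3_ge m
  push_cast
  omega

-- the while loop finding the bijective base-3 digit count m of v
def findM (v : Int) (m : Nat) : Nat :=
  if h : PySem.Int.floordiv ((3:Int) ^ (m + 1) - 1) 2 ≤ v then findM v (m + 1) else m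
termination_by (v + 1 - (m : Int)).toNat
decreasing_by exact findM_step v m h

-- the for-loop over j = k-1, …, 0: extract the top digit t by the arithmetic threshold and
-- fold it into res most-significant first
def bloop : Nat → Int → Int → Int
  | 0, _, res => res
  | k + 1, v, res =>
    let p : Int := 3 ^ k
    let t := PySem.Int.floordiv (v - PySem.Int.floordiv (p - 1) 2) p
    bloop k (v - t * p) (res * 16 + 8 + 2 * t)

def ace_alt (n : Int) : Int :=
  let v := n + 1
  if v ≤ 0 then 0
  else bloop (findM v 1) v 0

-- ===== PRECONDITION & SPEC =====
def Spec_ace (n : Int) (out : Int) : Prop := out = ace_alt n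
instance (n : Int) (out : Int) : Decidable (Spec_ace n out) := by unfold Spec_ace; infer_instance

-- ===== CLAIM (what is proved, stated in full; the proofs are below) =====
def Claim_equal_ace : Prop := ∀ (n : Int), Dom_ace n → Spec_ace n (ace n)

-- ===== LEMMAS AND PROOFS =====

-- the value A's loop accumulates, lowest digit first
def aceVal (n : Int) : Int :=
  if h : 0 ≤ n then
    ((PySem.List.pyGet? [10, 12, 14] (PySem.Int.mod n 3)).getD 0) + 16 * aceVal (PySem.Int.floordiv n 3 - 1)
  else 0
termination_by (n + 1).toNat
decreasing_by exact aceStep_lt n h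

theorem aceLoop_eq (n : Int) : ∀ base i, aceLoop n base i = i + base * aceVal n := by
  induction n using aceVal.induct with
  | case1 n h ih =>
    intro base i
    rw [aceLoop, aceVal, dif_pos h, dif_pos h, ih]
    ring
  | case2 n h =>
    intro base i
    rw [aceLoop, aceVal, dif_neg h, dif_neg h]
    ring

theorem aceVal_neg (n : Int) (h : n < 0) : aceVal n = 0 := by
  rw [aceVal, dif_neg (by omega)]

theorem aceVal_pos (n : Int) (h : 0 ≤ n) :
    aceVal n = 10 + 2 * (n % 3) + 16 * aceVal (n / 3 - 1) := by
  rw [aceVal, dif_pos h,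
    PySem.Int.mod_eq_emod_of_pos (by omega : (0:Int) < 3),
    PySem.Int.floordiv_eq_ediv_of_pos (by omega : (0:Int) < 3)]
  have hc : n % 3 = 0 ∨ n % 3 = 1 ∨ n % 3 = 2 := by omega
  rcases hc with h1 | h1 | h1 <;>
    simp [h1, PySem.List.pyGet?, PySem.List.pyIdx?]

-- the smallest value with k bijective base-3 digits, (3^k - 1)/2
def lowB (k : Nat) : Int := PySem.Int.floordiv ((3:Int) ^ k - 1) 2

theorem twoLow (k : Nat) : 2 * lowB k = 3 ^ k - 1 := by
  obtain ⟨q, hq⟩ := pow3_sub_one_even k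
  rw [lowB, hq, floordiv_two_odd _ q rfl]

-- key digit lemma: prepending the top bijective digit t (1..3) at weight 3^k adds (8+2t)·16^k
theorem aceVal_prepend (k : Nat) : ∀ t r : Int, 1 ≤ t → t ≤ 3 →
    lowB k ≤ r → r ≤ 3 * lowB k →
    aceVal (t * 3 ^ k + r - 1) = aceVal (r - 1) + (8 + 2 * t) * 16 ^ k := by
  induction k with
  | zero =>
    intro t r ht1 ht3 hr1 hr3
    have hl : lowB 0 = 0 := by have := twoLow 0; omega
    have hr : r = 0 := by omega
    subst hr
    rw [aceVal_pos (t * 3 ^ 0 + 0 - 1) (by omega), aceVal_neg (0 - 1) (by omega)]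
    have h1 : (t * 3 ^ 0 + 0 - 1) = t - 1 := by ring
    rw [h1]
    have h2 : (t - 1) % 3 = t - 1 := by omega
    have h3 : (t - 1) / 3 - 1 = -1 := by omega
    rw [h2, h3, aceVal_neg (-1) (by omega)]
    norm_num
    omega
  | succ k ih =>
    intro t r ht1 ht3 hr1 hr3
    have hp : (0:Int) < 3 ^ k := by positivity
    have h2l : 2 * lowB k = 3 ^ k - 1 := twoLow k
    have h2l' : 2 * lowB (k + 1) = 3 ^ (k + 1) - 1 := twoLow (k + 1)
    have hps : (3:Int) ^ (k + 1) = 3 * 3 ^ k := by ring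
    have hrpos : 1 ≤ r := by omega
    -- unfold one step of aceVal at n = t·3^(k+1) + r - 1
    have hn0 : (0:Int) ≤ t * 3 ^ (k + 1) + r - 1 := by nlinarith
    rw [aceVal_pos _ hn0, aceVal_pos (r - 1) (by omega)]
    have hform : t * 3 ^ (k + 1) + r - 1 = (r - 1) + (t * 3 ^ k) * 3 := by rw [hps]; ring
    have hmod : (t * 3 ^ (k + 1) + r - 1) % 3 = (r - 1) % 3 := by
      omega
    have hdiv : (t * 3 ^ (k + 1) + r - 1) / 3 = (r - 1) / 3 + t * 3 ^ k := by
      omega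
    rw [hmod, hdiv]
    -- bounds on the peeled remainder r' = (r-1)/3
    have hr'lo : lowB k ≤ (r - 1) / 3 := by omega
    have hr'hi : (r - 1) / 3 ≤ 3 * lowB k := by omega
    have harg : (r - 1) / 3 + t * 3 ^ k - 1 = t * 3 ^ k + (r - 1) / 3 - 1 := by ring
    rw [harg, ih t ((r - 1) / 3) ht1 ht3 hr'lo hr'hi]
    have h16 : (16:Int) ^ (k + 1) = 16 * 16 ^ k := by ring
    rw [h16]
    ring

-- B's MSB-first fold equals A's LSB-first value, for v with exactly k digits
theorem bloop_eq (k : Nat) : ∀ v res : Int, lowB k ≤ v → v ≤ 3 * lowB k →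
    bloop k v res = res * 16 ^ k + aceVal (v - 1) := by
  induction k with
  | zero =>
    intro v res h1 h3
    have hl : lowB 0 = 0 := by have := twoLow 0; omega
    have hv : v = 0 := by omega
    subst hv
    rw [bloop, aceVal_neg (0 - 1) (by omega)]
    norm_num
  | succ k ih =>
    intro v res h1 h3
    have hp : (0:Int) < 3 ^ k := by positivity
    have h2l : 2 * lowB k = 3 ^ k - 1 := twoLow k
    have h2l' : 2 * lowB (k + 1) = 3 ^ (k + 1) - 1 := twoLow (k + 1)
    have hps : (3:Int) ^ (k + 1) = 3 * 3 ^ k := by ring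
    rw [bloop]
    have hinlow : PySem.Int.floordiv ((3:Int) ^ k - 1) 2 = lowB k := rfl
    rw [hinlow]
    set t := PySem.Int.floordiv (v - lowB k) (3 ^ k) with hts
    have htb := (PySem.Int.floordiv_eq_iff_of_pos hp).mp hts.symm
    obtain ⟨htlo, hthi⟩ := htb
    have hee : (t + 1) * 3 ^ k = t * 3 ^ k + 3 ^ k := by ring
    -- 1 ≤ t ≤ 3 and the remainder v - t·3^k lies in the (k)-digit range
    have ht1 : 1 ≤ t := by nlinarith
    have ht3 : t ≤ 3 := by nlinarith
    have hrlo : lowB k ≤ v - t * 3 ^ k := by omega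
    have hrhi : v - t * 3 ^ k ≤ 3 * lowB k := by omega
    rw [ih (v - t * 3 ^ k) _ hrlo hrhi]
    have hv : v - 1 = t * 3 ^ k + (v - t * 3 ^ k) - 1 := by ring
    rw [hv, aceVal_prepend k t (v - t * 3 ^ k) ht1 ht3 hrlo hrhi]
    have h16 : (16:Int) ^ (k + 1) = 16 * 16 ^ k := by ring
    rw [h16]
    ring

-- the digit-count search lands in the correct digit range
theorem findM_range (v : Int) (m : Nat) : lowB m ≤ v →
    lowB (findM v m) ≤ v ∧ v ≤ 3 * lowB (findM v m) := by
  induction m using findM.induct (v := v) with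
  | case1 m h ih =>
    intro _
    rw [findM, dif_pos h]
    exact ih h
  | case2 m h =>
    intro hlo
    rw [findM, dif_neg h]
    have h2l : 2 * lowB m = 3 ^ m - 1 := twoLow m
    have h2l' : 2 * lowB (m + 1) = 3 ^ (m + 1) - 1 := twoLow (m + 1)
    have hps : (3:Int) ^ (m + 1) = 3 * 3 ^ m := by ring
    have : ¬ lowB (m + 1) ≤ v := h
    constructor
    · exact hlo
    · omega

-- ===== VERDICT (by name: the statement is the Claim_ definition above) =====
theorem ace_spec : Claim_equal_ace := by
  intro n _
  unfold Spec_ace ace ace_alt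
  rw [aceLoop_eq]
  by_cases h : n + 1 ≤ 0
  · rw [if_pos h, aceVal_neg n (by omega)]
    ring
  · rw [if_neg h]
    have hl1 : lowB 1 = 1 := by have := twoLow 1; omega
    have hlo : lowB 1 ≤ n + 1 := by omega
    obtain ⟨ha, hb⟩ := findM_range (n + 1) 1 hlo
    rw [bloop_eq (findM (n + 1) 1) (n + 1) 0 ha hb]
    have hx : n + 1 - 1 = n := by ring
    rw [hx]
    ring
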